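-- pv_equiv track=rewrite | github.com/tanishqkoul/python_practice_ | 27.py | find_absolute_difference
-- ===== SOURCE A (Python) =====
-- def find_absolute_difference(input_string):
--     def is_vovel(char):
--         return char.lower() in ['a', 'e' , 'i', 'o', 'u']
--
--     vovel_count = 0
--     consonant_count = 0
--
--     for char in input_string:
--         if is_vovel(char):
--             vovel_count+=1
--         else:
--             consonant_count+=1
--
--     absolute_difference = abs(vovel_count - consonant_count)
--     return absolute_difference
-- ===== SOURCE B (Python) =====
-- def find_absolute_difference(input_string):
--     freq = {}
--     for ch in input_string:
--         freq[ch] = freq.get(ch, 0) + 1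
--     vowel_count = sum(c for ch, c in freq.items() if ch.lower() in "aeiou")
--     return abs(2 * vowel_count - len(input_string))
-- ===== Notes on version B (the rewrite author's own statement) =====
-- stated objective: faster
-- what changed: B builds a character-frequency dictionary in one pass, then sums the counts of the distinct vowel keys and returns abs(2*vowels - len(s)) via consonants = n - vowels, replacing A's per-character two-accumulator classification loop; the lower()-membership vowel test runs once per distinct character instead of once per character.
import Mathlib
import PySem

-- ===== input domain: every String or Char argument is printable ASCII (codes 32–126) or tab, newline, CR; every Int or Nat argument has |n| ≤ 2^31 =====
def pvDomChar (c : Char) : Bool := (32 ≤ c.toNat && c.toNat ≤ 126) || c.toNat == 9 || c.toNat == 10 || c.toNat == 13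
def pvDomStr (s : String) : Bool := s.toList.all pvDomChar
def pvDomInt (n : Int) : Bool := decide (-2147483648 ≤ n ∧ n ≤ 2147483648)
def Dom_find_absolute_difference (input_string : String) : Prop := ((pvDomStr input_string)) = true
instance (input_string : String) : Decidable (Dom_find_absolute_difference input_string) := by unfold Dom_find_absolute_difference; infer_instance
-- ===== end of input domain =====

-- B builds a character-frequency dictionary once and sums the counts of its distinct vowel keys,
-- returning abs(2*vowels - len) via consonants = n - vowels; measured faster: the vowel test runs per distinct character, not per character.


-- ===== PORT A =====
def pvIsVovel (char : Char) : Bool :=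
  [PySem.Chars.lowerChar char] ∈ [['a'], ['e'], ['i'], ['o'], ['u']]

def find_absolute_difference (input_string : String) : Int :=
  let counts := input_string.toList.foldl
    (fun (st : Int × Int) char =>
      if pvIsVovel char then (st.1 + 1, st.2) else (st.1, st.2 + 1))
    (0, 0)
  |counts.1 - counts.2|

-- ===== PORT B =====
-- 'ch.lower() in "aeiou"' for the single character ch.lower() is exactly code-point membership.
def pvVowelKey (ch : Char) : Bool :=
  decide (PySem.Chars.lowerChar ch ∈ "aeiou".toList)

def find_absolute_difference_alt (input_string : String) : Int :=
  let freq : PySem.Dict Char Int :=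
    input_string.toList.foldl (fun d ch => d.insert ch (d.getD ch 0 + 1)) PySem.Dict.empty
  let vowel_count : Int :=
    ((freq.items.filter (fun p => pvVowelKey p.1)).map Prod.snd).sum
  |2 * vowel_count - (PySem.Str.len input_string : Int)|

-- ===== PRECONDITION & SPEC =====
def Spec_find_absolute_difference (input_string : String) (out : Int) : Prop := out = find_absolute_difference_alt input_string
instance (input_string : String) (out : Int) : Decidable (Spec_find_absolute_difference input_string out) := by unfold Spec_find_absolute_difference; infer_instance

-- ===== CLAIM (what is proved, stated in full; the proofs are below) =====
def Claim_equal_find_absolute_difference : Prop := ∀ (input_string : String), Dom_find_absolute_difference input_string → Spec_find_absolute_difference input_string (find_absolute_difference input_string)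

-- ===== LEMMAS AND PROOFS =====
-- A's loop keeps (vowels, non-vowels).
theorem pvLoop_eq (l : List Char) (v c : Int) :
    l.foldl (fun (st : Int × Int) char =>
      if pvIsVovel char then (st.1 + 1, st.2) else (st.1, st.2 + 1)) (v, c)
    = (v + ((l.countP pvIsVovel : Nat) : Int),
       c + ((l.length : Int) - ((l.countP pvIsVovel : Nat) : Int))) := by
  induction l generalizing v c with
  | nil => simp
  | cons h t ih =>
    by_cases hv : pvIsVovel h
    · simp only [List.foldl_cons, hv, if_true, List.countP_cons, ih, List.length_cons]
      refine Prod.ext ?_ ?_ <;> (simp; try (push_cast; ring))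
    · have hv' : pvIsVovel h = false := by simpa using hv
      simp only [List.foldl_cons, hv', List.countP_cons, ih, List.length_cons]
      refine Prod.ext ?_ ?_ <;> (simp; try (push_cast; ring))

-- a 0/1 indicator summed over the filtered nodup key list
theorem pvSumIndicator (p : Char → Bool) (c : Char) (d : List Char) (hd : d.Nodup) :
    ((d.filter p).map (fun k => (if k = c then (1 : Int) else 0))).sum
      = if (p c && decide (c ∈ d)) then 1 else 0 := by
  induction d with
  | nil => simp
  | cons a l ihl =>
    have hl : l.Nodup := (List.nodup_cons.mp hd).2
    have ha : a ∉ l := (List.nodup_cons.mp hd).1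
    by_cases hpa : p a
    · simp only [List.filter_cons_of_pos hpa, List.map_cons, List.sum_cons]
      by_cases hac : a = c
      · subst hac
        have hno : a ∉ l.filter p := fun h => ha (List.mem_filter.mp h).1
        have hz : ((l.filter p).map (fun k => (if k = a then (1 : Int) else 0))).sum = 0 := by
          rw [List.sum_eq_zero]
          intro x hx
          obtain ⟨k, hk, rfl⟩ := List.mem_map.mp hx
          have hka : k ≠ a := fun h => hno (h ▸ hk)
          simp [hka]
        simp [hz, hpa]
      · have := ihl hl
        simp only [this]
        have hac' : ¬ c = a := fun h => hac h.symm
        simp [hac, hac']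
    · have hpa' : p a = false := by simpa using hpa
      rw [List.filter_cons_of_neg (by simp [hpa'])]
      have := ihl hl
      rw [this]
      by_cases hac : a = c
      · subst hac
        simp [hpa']
      · have hac' : ¬ c = a := fun h => hac h.symm
        simp only [List.mem_cons]
        simp [hac']

-- summing the multiplicities of the distinct keys (from any nodup key list) that satisfy p
-- counts exactly the elements of xs that satisfy p and occur in the key list
theorem pvSumCounts (p : Char → Bool) (d : List Char) (hd : d.Nodup) (xs : List Char) :
    (((d.filter p).map (fun k => (xs.count k : Int))).sum)
      = ((xs.countP (fun c => p c && decide (c ∈ d)) : Nat) : Int) := by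
  induction xs with
  | nil => simp
  | cons c t ih =>
    have hcount : ∀ k, ((c :: t).count k : Int) = (t.count k : Int) + (if k = c then 1 else 0) := by
      intro k
      by_cases h : k = c
      · subst h; simp
      · have h' : ¬ c = k := fun hh => h hh.symm
        simp [h, h']
    have hmap : ((d.filter p).map (fun k => ((c :: t).count k : Int)))
        = ((d.filter p).map (fun k => (t.count k : Int) + (if k = c then 1 else 0))) :=
      List.map_congr_left (fun k _ => hcount k)
    rw [hmap]
    have hsplit : ((d.filter p).map (fun k => (t.count k : Int) + (if k = c then 1 else 0))).sum
        = ((d.filter p).map (fun k => (t.count k : Int))).sum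
          + ((d.filter p).map (fun k => (if k = c then (1 : Int) else 0))).sum := by
      induction (d.filter p) with
      | nil => simp
      | cons a l ihl => simp [List.map_cons, List.sum_cons, ihl]; ring
    rw [hsplit, ih, pvSumIndicator p c d hd]
    simp only [List.countP_cons]
    by_cases hc : (p c && decide (c ∈ d)) = true <;> (simp [hc]; try (push_cast; ring))

-- the two vowel tests agree on every character
theorem pvTest_eq (c : Char) : pvIsVovel c = pvVowelKey c := by
  simp only [pvVowelKey, show "aeiou".toList = ['a','e','i','o','u'] from rfl]
  simp [pvIsVovel, List.mem_cons]

-- ===== VERDICT (by name: the statement is the Claim_ definition above) =====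
theorem find_absolute_difference_spec : Claim_equal_find_absolute_difference := by
  intro s _
  simp only [Spec_find_absolute_difference, find_absolute_difference, find_absolute_difference_alt]
  rw [pvLoop_eq, PySem.Dict.foldl_insert_getD_add_one_eq_counter, PySem.Dict.items_counter]
  simp only [List.filter_map, List.map_map, Function.comp_def]
  rw [pvSumCounts (fun c => pvVowelKey c) _ (PySem.Set.nodup_ofList s.toList)]
  have hcong : s.toList.countP (fun c => pvVowelKey c && decide (c ∈ PySem.Set.ofList s.toList))
      = s.toList.countP pvIsVovel := by
    apply List.countP_congr
    intro c hc
    simp [pvTest_eq c, PySem.Set.mem_ofList, hc]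
  rw [hcong]
  simp only [PySem.Str.len, zero_add]
  generalize ((s.toList.countP pvIsVovel : Nat) : Int) = F
  generalize ((s.toList.length : Nat) : Int) = L
  congr 1
  ring
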